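-- pv_equiv track=rewrite | github.com/nathtjan/automixer | metric.py | lcs_1gram
-- ===== SOURCE A (Python) =====
-- def levenshtein_distance(s1, s2):
--     """Compute Levenshtein distance using only two rows (space-optimized)."""
--     if len(s1) < len(s2):
--         s1, s2 = s2, s1  # Ensure s1 is longer
--
--     previous = list(range(len(s2) + 1))
--     current = [0] * (len(s2) + 1)
--
--     for i, c1 in enumerate(s1, 1):
--         current[0] = i
--         for j, c2 in enumerate(s2, 1):
--             insert = current[j - 1] + 1
--             delete = previous[j] + 1
--             substitute = previous[j - 1] + (c1 != c2)
--             current[j] = min(insert, delete, substitute)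
--         previous, current = current, previous  # Swap
--
--     return previous[len(s2)]
--
-- def lcs_1gram(seq1, seq2, tolerance=0):
--     """
--     Optimized 1-gram LCS using fast Levenshtein distance.
--     Two words are equal if their distance <= tolerance.
--     """
--     m, n = len(seq1), len(seq2)
--     dp = [[0] * (n + 1) for _ in range(m + 1)]
--
--     def equal_with_tolerance(a, b):
--         if abs(len(a) - len(b)) > tolerance:
--             return False
--         return levenshtein_distance(a, b) <= tolerance
--
--     # Fill DP table
--     for i in range(m):
--         for j in range(n):
--             if equal_with_tolerance(seq1[i], seq2[j]):
--                 dp[i + 1][j + 1] = dp[i][j] + 1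
--             else:
--                 dp[i + 1][j + 1] = max(dp[i][j + 1], dp[i + 1][j])
--
--     # Reconstruct LCS
--     lcs = []
--     i, j = m, n
--     while i > 0 and j > 0:
--         if equal_with_tolerance(seq1[i - 1], seq2[j - 1]):
--             lcs.append(seq1[i - 1])  # or seq2[j - 1]
--             i -= 1
--             j -= 1
--         elif dp[i - 1][j] >= dp[i][j - 1]:
--             i -= 1
--         else:
--             j -= 1
--
--     return dp[m][n], lcs[::-1]
-- ===== SOURCE B (Python) =====
-- def levenshtein_distance(s1, s2):
--     """Compute Levenshtein distance using only two rows (space-optimized)."""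
--     if len(s1) < len(s2):
--         s1, s2 = s2, s1  # Ensure s1 is longer
--
--     previous = list(range(len(s2) + 1))
--     current = [0] * (len(s2) + 1)
--
--     for i, c1 in enumerate(s1, 1):
--         current[0] = i
--         for j, c2 in enumerate(s2, 1):
--             insert = current[j - 1] + 1
--             delete = previous[j] + 1
--             substitute = previous[j - 1] + (c1 != c2)
--             current[j] = min(insert, delete, substitute)
--         previous, current = current, previous  # Swap
--
--     return previous[len(s2)]
--
-- def lcs_1gram(seq1, seq2, tolerance=0):
--     """Forward one-pass DP: each cell carries (length, lcs-list); no backtrack."""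
--     def equal_with_tolerance(a, b):
--         if abs(len(a) - len(b)) > tolerance:
--             return False
--         return levenshtein_distance(a, b) <= tolerance
--
--     n = len(seq2)
--     row = [(0, [])] * (n + 1)
--     for x in seq1:
--         new = [(0, [])]
--         cur = (0, [])
--         for j, y in enumerate(seq2):
--             p0 = row[j]
--             p1 = row[j + 1]
--             if equal_with_tolerance(x, y):
--                 cur = (p0[0] + 1, p0[1] + [x])
--             elif p1[0] >= cur[0]:
--                 cur = p1
--             new.append(cur)
--         row = new
--     v, l = row[n]
--     return v, l
-- ===== Notes on version B (the rewrite author's own statement) =====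
-- stated objective: alternative
-- what changed: B replaces A's fill-table-then-backtrack with a single forward pass over two rolling rows whose cells carry (length, lcs-list) pairs, eliminating the whole reconstruction loop and the (m+1)x(n+1) table.
import Mathlib
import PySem

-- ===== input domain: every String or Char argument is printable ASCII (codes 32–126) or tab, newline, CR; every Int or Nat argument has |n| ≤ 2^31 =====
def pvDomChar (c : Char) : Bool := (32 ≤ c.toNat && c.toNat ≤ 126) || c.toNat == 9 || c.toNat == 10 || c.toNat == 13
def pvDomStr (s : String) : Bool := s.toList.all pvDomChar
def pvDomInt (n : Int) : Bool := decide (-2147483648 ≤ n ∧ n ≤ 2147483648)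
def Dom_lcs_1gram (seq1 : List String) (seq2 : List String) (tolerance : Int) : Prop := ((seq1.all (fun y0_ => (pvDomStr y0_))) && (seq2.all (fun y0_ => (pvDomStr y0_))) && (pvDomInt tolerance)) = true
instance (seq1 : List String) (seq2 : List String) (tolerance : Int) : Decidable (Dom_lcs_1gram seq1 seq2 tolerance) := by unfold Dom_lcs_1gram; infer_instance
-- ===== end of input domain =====

-- B replaces A's fill-table-then-backtrack with one forward pass over rolling rows of
-- (length, lcs-list) cells; same results, no reconstruction loop (objective: alternative).
-- The helpers levenshtein_distance / equal_with_tolerance are textually identical in Source A and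
-- Source B, so their port below is shared by both ports.

-- ===== PORT A =====
-- shared helper: levenshtein_distance (identical code in Source A and Source B).
-- inner loop over s2: in-place writes current[j] left-to-right read only current[j-1] and
-- previous, so building the new row as a fresh list is the exact same computation.
def pvLevLoop (c1 : Char) (prev : List Int) (cur : Int) : List Char → List Int
  | [] => []
  | c2 :: cs =>
    match prev with
    | [] => []  -- unreachable: prev always one longer than the remaining s2 suffix
    | p0 :: rest =>
      let v := min (min (cur + 1) (rest.headD 0 + 1)) (p0 + (if c1 = c2 then 0 else 1))
      v :: pvLevLoop c1 rest v cs

def pvLevRows (s2 : List Char) (prev : List Int) (i : Int) : List Char → List Int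
  | [] => prev
  | c1 :: rest => pvLevRows s2 (i :: pvLevLoop c1 prev i s2) (i + 1) rest

def levenshtein_distance (s1 s2 : String) : Int :=
  let l1 := s1.toList
  let l2 := s2.toList
  let (a, b) := if l1.length < l2.length then (l2, l1) else (l1, l2)
  (pvLevRows b ((List.range (b.length + 1)).map (Int.ofNat)) 1 a).getLastD 0

-- shared helper: equal_with_tolerance (identical code in Source A and Source B)
def pvEqTol (tol : Int) (a b : String) : Bool :=
  if (((a.toList.length : Int) - (b.toList.length : Int)).natAbs : Int) > tol then false
  else levenshtein_distance a b ≤ tol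

-- A's DP fill, row by row (in-place row writes read only already-written cells)
def pvLoopA (tol : Int) (x : String) (prev : List Int) (cur : Int) : List String → List Int
  | [] => []
  | y :: ys =>
    match prev with
    | [] => []  -- unreachable
    | p0 :: rest =>
      let v := if pvEqTol tol x y then p0 + 1 else max (rest.headD 0) cur
      v :: pvLoopA tol x rest v ys

def pvBuildA (tol : Int) (seq2 : List String) (prev : List Int) : List String → List (List Int)
  | [] => [prev]
  | x :: xs => prev :: pvBuildA tol seq2 (0 :: pvLoopA tol x prev 0 seq2) xs

-- A's backtrack loop (indices are in range throughout, so getD is exact)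
def pvBackA (tol : Int) (seq1 seq2 : List String) (dp : List (List Int)) :
    Nat → Nat → List String → List String
  | i + 1, j + 1, acc =>
    let x := seq1.getD i ""
    let y := seq2.getD j ""
    if pvEqTol tol x y then pvBackA tol seq1 seq2 dp i j (acc ++ [x])
    else if (dp.getD i []).getD (j + 1) 0 ≥ (dp.getD (i + 1) []).getD j 0 then
      pvBackA tol seq1 seq2 dp i (j + 1) acc
    else pvBackA tol seq1 seq2 dp (i + 1) j acc
  | _, _, acc => acc
termination_by i j _ => i + j

def lcs_1gram (seq1 : List String) (seq2 : List String) (tolerance : Int) : Int × List String :=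
  let m := seq1.length
  let n := seq2.length
  let dp := pvBuildA tolerance seq2 (List.replicate (n + 1) 0) seq1
  let lcs := pvBackA tolerance seq1 seq2 dp m n []
  ((dp.getD m []).getD n 0, lcs.reverse)

-- ===== PORT B =====
-- B: one forward pass; each cell is (lcs length, lcs list); no table, no backtrack
def pvLoopB (tol : Int) (x : String) (prev : List (Int × List String))
    (cur : Int × List String) : List String → List (Int × List String)
  | [] => []
  | y :: ys =>
    match prev with
    | [] => []  -- unreachable
    | p0 :: rest =>
      let c :=
        if pvEqTol tol x y then (p0.1 + 1, p0.2 ++ [x])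
        else if (rest.headD (0, [])).1 ≥ cur.1 then rest.headD (0, []) else cur
      c :: pvLoopB tol x rest c ys

def pvBuildB (tol : Int) (seq2 : List String) (row : List (Int × List String)) :
    List String → List (Int × List String)
  | [] => row
  | x :: xs => pvBuildB tol seq2 (((0 : Int), ([] : List String)) :: pvLoopB tol x row (0, []) seq2) xs

def lcs_1gram_alt (seq1 : List String) (seq2 : List String) (tolerance : Int) : Int × List String :=
  let n := seq2.length
  let row := pvBuildB tolerance seq2 (List.replicate (n + 1) ((0 : Int), ([] : List String))) seq1
  let c := row.getD n (0, [])
  (c.1, c.2)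

-- ===== PRECONDITION & SPEC =====
def Spec_lcs_1gram (seq1 : List String) (seq2 : List String) (tolerance : Int) (out : Int × List String) : Prop := out = lcs_1gram_alt seq1 seq2 tolerance
instance (seq1 : List String) (seq2 : List String) (tolerance : Int) (out : Int × List String) : Decidable (Spec_lcs_1gram seq1 seq2 tolerance out) := by unfold Spec_lcs_1gram; infer_instance

-- ===== CLAIM (what is proved, stated in full; the proofs are below) =====
def Claim_equal_lcs_1gram : Prop := ∀ (seq1 : List String) (seq2 : List String) (tolerance : Int), Dom_lcs_1gram seq1 seq2 tolerance → Spec_lcs_1gram seq1 seq2 tolerance (lcs_1gram seq1 seq2 tolerance)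

-- ===== LEMMAS AND PROOFS =====

-- ghost reference: the common value both programs compute, by recursion on REVERSED prefixes
def pvG (tol : Int) : List String → List String → Int × List String
  | [], _ => (0, [])
  | _ :: _, [] => (0, [])
  | x :: rx, y :: ry =>
    if pvEqTol tol x y then
      let p := pvG tol rx ry
      (p.1 + 1, p.2 ++ [x])
    else
      let u := pvG tol rx (y :: ry)
      let l := pvG tol (x :: rx) ry
      if u.1 ≥ l.1 then u else l
termination_by r1 r2 => r1.length + r2.length

theorem pvG_nil_right (tol : Int) (r1 : List String) : pvG tol r1 [] = (0, []) := by
  cases r1 <;> simp [pvG]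

-- the row of pvG-cells for first argument r1, columns = reversed prefixes of ys on top of r2
def pvRowG (tol : Int) (r1 r2 : List String) : List String → List (Int × List String)
  | [] => [pvG tol r1 r2]
  | y :: ys => pvG tol r1 r2 :: pvRowG tol r1 (y :: r2) ys

theorem pvRowG_head (tol : Int) (r1 r2 : List String) (ys : List String) :
    (pvRowG tol r1 r2 ys).headD (0, []) = pvG tol r1 r2 := by
  cases ys <;> rfl

theorem pvRowG_nil (tol : Int) (r2 : List String) (ys : List String) :
    pvRowG tol [] r2 ys = List.replicate (ys.length + 1) ((0 : Int), ([] : List String)) := by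
  induction ys generalizing r2 with
  | nil => simp [pvRowG, pvG, List.replicate]
  | cons y ys ih => simp [pvRowG, pvG, List.replicate, ih]


theorem pvRowG_map_headD (tol : Int) (r1 r2 : List String) (ys : List String) :
    ((pvRowG tol r1 r2 ys).map Prod.fst).headD 0 = (pvG tol r1 r2).1 := by
  cases ys <;> rfl

theorem pvG_cons_cons (tol : Int) (x y : String) (rx ry : List String) :
    pvG tol (x :: rx) (y :: ry) =
      if pvEqTol tol x y then ((pvG tol rx ry).1 + 1, (pvG tol rx ry).2 ++ [x])
      else if (pvG tol rx (y :: ry)).1 ≥ (pvG tol (x :: rx) ry).1 then pvG tol rx (y :: ry)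
      else pvG tol (x :: rx) ry := by
  rw [pvG]

-- B's inner loop computes the next pvRowG row
theorem pvLoopB_rowG (tol : Int) (x : String) (r1 : List String) :
    ∀ (ys : List String) (y : String) (r2 : List String),
      pvLoopB tol x (pvRowG tol r1 r2 (y :: ys)) (pvG tol (x :: r1) r2) (y :: ys) =
        pvRowG tol (x :: r1) (y :: r2) ys := by
  intro ys
  induction ys with
  | nil =>
    intro y r2
    simp [pvRowG, pvLoopB, pvG_cons_cons]
  | cons y' ys ih =>
    intro y r2
    show pvLoopB tol x (pvG tol r1 r2 :: pvRowG tol r1 (y :: r2) (y' :: ys))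
        (pvG tol (x :: r1) r2) (y :: y' :: ys) = _
    rw [pvLoopB]
    simp only [pvRowG_head]
    rw [← pvG_cons_cons tol x y r1 r2]
    rw [ih y' (y :: r2)]
    rfl

theorem pvStepB (tol : Int) (x : String) (r1 : List String) (seq2 : List String) :
    ((0 : Int), ([] : List String)) :: pvLoopB tol x (pvRowG tol r1 [] seq2) (0, []) seq2 =
      pvRowG tol (x :: r1) [] seq2 := by
  cases seq2 with
  | nil => simp [pvRowG, pvLoopB, pvG_nil_right]
  | cons y ys =>
    rw [show ((0 : Int), ([] : List String)) = pvG tol (x :: r1) [] from (pvG_nil_right tol _).symm]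
    rw [pvLoopB_rowG]
    rfl

theorem pvBuildB_rowG (tol : Int) (seq2 : List String) :
    ∀ (xs r1 : List String),
      pvBuildB tol seq2 (pvRowG tol r1 [] seq2) xs = pvRowG tol (xs.reverse ++ r1) [] seq2 := by
  intro xs
  induction xs with
  | nil => intro r1; rfl
  | cons x xs ih =>
    intro r1
    rw [pvBuildB, pvStepB, ih (x :: r1)]
    simp

theorem pvRowG_getD_last (tol : Int) (r1 : List String) :
    ∀ (ys r2 : List String),
      (pvRowG tol r1 r2 ys).getD ys.length (0, []) = pvG tol r1 (ys.reverse ++ r2) := by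
  intro ys
  induction ys with
  | nil => intro r2; rfl
  | cons y ys ih =>
    intro r2
    show (pvG tol r1 r2 :: pvRowG tol r1 (y :: r2) ys).getD (ys.length + 1) (0, []) = _
    rw [List.getD_cons_succ, ih (y :: r2)]
    simp

-- A's inner loop computes the fst-projection of the next pvRowG row
theorem pvLoopA_rowG (tol : Int) (x : String) (r1 : List String) :
    ∀ (ys : List String) (y : String) (r2 : List String),
      pvLoopA tol x ((pvRowG tol r1 r2 (y :: ys)).map Prod.fst) ((pvG tol (x :: r1) r2).1) (y :: ys) =
        (pvRowG tol (x :: r1) (y :: r2) ys).map Prod.fst := by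
  intro ys
  induction ys with
  | nil =>
    intro y r2
    simp only [pvRowG, List.map_cons, List.map_nil, pvLoopA, List.headD_cons, pvG_cons_cons]
    split_ifs with h1 h2 <;> simp <;> omega
  | cons y' ys ih =>
    intro y r2
    show pvLoopA tol x ((pvG tol r1 r2).1 :: (pvRowG tol r1 (y :: r2) (y' :: ys)).map Prod.fst)
        ((pvG tol (x :: r1) r2).1) (y :: y' :: ys) = _
    rw [pvLoopA]
    simp only [pvRowG_map_headD]
    rw [show (if pvEqTol tol x y then (pvG tol r1 r2).1 + 1
         else max (pvG tol r1 (y :: r2)).1 (pvG tol (x :: r1) r2).1)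
        = (pvG tol (x :: r1) (y :: r2)).1 by
      rw [pvG_cons_cons]; split_ifs with h1 h2 <;> simp <;> omega]
    rw [ih y' (y :: r2)]
    rfl

theorem pvStepA (tol : Int) (x : String) (r1 : List String) (seq2 : List String) :
    (0 : Int) :: pvLoopA tol x ((pvRowG tol r1 [] seq2).map Prod.fst) 0 seq2 =
      (pvRowG tol (x :: r1) [] seq2).map Prod.fst := by
  cases seq2 with
  | nil => simp [pvRowG, pvLoopA, pvG_nil_right]
  | cons y ys =>
    rw [show (0 : Int) = (pvG tol (x :: r1) []).1 by rw [pvG_nil_right]]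
    rw [pvLoopA_rowG]
    simp [pvRowG, pvG_nil_right]

theorem pvTableA (tol : Int) (seq2 : List String) :
    ∀ (xs r1 : List String) (i : Nat), i ≤ xs.length →
      (pvBuildA tol seq2 ((pvRowG tol r1 [] seq2).map Prod.fst) xs).getD i [] =
        (pvRowG tol ((xs.take i).reverse ++ r1) [] seq2).map Prod.fst := by
  intro xs
  induction xs with
  | nil =>
    intro r1 i hi
    have h0 : i = 0 := by simp at hi; omega
    subst h0
    rfl
  | cons x xs ih =>
    intro r1 i hi
    cases i with
    | zero => rfl
    | succ i =>
      show (pvBuildA tol seq2 _ (x :: xs)).getD (i + 1) [] = _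
      rw [pvBuildA, List.getD_cons_succ, pvStepA, ih (x :: r1) i (by simpa using hi)]
      simp

theorem pvRowG_fst_getD (tol : Int) (r1 : List String) :
    ∀ (ys : List String) (j : Nat) (r2 : List String), j ≤ ys.length →
      ((pvRowG tol r1 r2 ys).map Prod.fst).getD j 0 = (pvG tol r1 ((ys.take j).reverse ++ r2)).1 := by
  intro ys
  induction ys with
  | nil =>
    intro j r2 hj
    have h0 : j = 0 := by simp at hj; omega
    subst h0
    rfl
  | cons y ys ih =>
    intro j r2 hj
    cases j with
    | zero => rfl
    | succ j =>
      show ((pvG tol r1 r2).1 :: (pvRowG tol r1 (y :: r2) ys).map Prod.fst).getD (j + 1) 0 = _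
      rw [List.getD_cons_succ, ih j (y :: r2) (by simpa using hj)]
      simp

theorem pvReplicate_row (tol : Int) (seq2 : List String) :
    List.replicate (seq2.length + 1) (0 : Int) = (pvRowG tol [] [] seq2).map Prod.fst := by
  rw [pvRowG_nil]
  simp

-- the backtrack from (i, j) reads off pvG on the reversed prefixes
theorem pvBackA_eq (tol : Int) (seq1 seq2 : List String) :
    ∀ (i j : Nat), i ≤ seq1.length → j ≤ seq2.length → ∀ (acc : List String),
      pvBackA tol seq1 seq2 (pvBuildA tol seq2 (List.replicate (seq2.length + 1) 0) seq1) i j acc =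
        acc ++ ((pvG tol ((seq1.take i).reverse) ((seq2.take j).reverse)).2).reverse
  | 0, j, _, _, acc => by
    simp [pvBackA, pvG]
  | i + 1, 0, _, _, acc => by
    simp [pvBackA, pvG_nil_right]
  | i + 1, j + 1, hi, hj, acc => by
    have hi' : i < seq1.length := hi
    have hj' : j < seq2.length := hj
    have hx : seq1.getD i "" = seq1[i] := List.getD_eq_getElem seq1 "" hi'
    have hy : seq2.getD j "" = seq2[j] := List.getD_eq_getElem seq2 "" hj'
    have ht1 : (seq1.take (i + 1)).reverse = seq1[i] :: (seq1.take i).reverse := by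
      rw [List.take_add_one, List.getElem?_eq_getElem hi']
      simp
    have ht2 : (seq2.take (j + 1)).reverse = seq2[j] :: (seq2.take j).reverse := by
      rw [List.take_add_one, List.getElem?_eq_getElem hj']
      simp
    have hdp : ∀ (a : Nat), a ≤ seq1.length → ∀ (b : Nat), b ≤ seq2.length →
        ((pvBuildA tol seq2 (List.replicate (seq2.length + 1) 0) seq1).getD a []).getD b 0 =
          (pvG tol ((seq1.take a).reverse) ((seq2.take b).reverse)).1 := by
      intro a ha b hb
      rw [pvReplicate_row tol seq2, pvTableA tol seq2 seq1 [] a ha,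
        pvRowG_fst_getD tol _ seq2 b [] hb]
      simp
    rw [pvBackA]
    rw [hx, hy, ht1, ht2, pvG_cons_cons]
    by_cases heq : pvEqTol tol seq1[i] seq2[j]
    · simp only [heq, if_true]
      rw [pvBackA_eq tol seq1 seq2 i j (le_of_lt hi') (le_of_lt hj') (acc ++ [seq1[i]])]
      simp
    · simp only [heq, if_false, Bool.false_eq_true]
      rw [hdp i (le_of_lt hi') (j + 1) hj, hdp (i + 1) hi j (le_of_lt hj')]
      rw [ht1, ht2]
      by_cases hge : (pvG tol ((seq1.take i).reverse) (seq2[j] :: (seq2.take j).reverse)).1 ≥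
          (pvG tol (seq1[i] :: (seq1.take i).reverse) ((seq2.take j).reverse)).1
      · simp only [hge, if_true]
        rw [pvBackA_eq tol seq1 seq2 i (j + 1) (le_of_lt hi') hj acc]
        rw [ht2]
      · simp only [hge, if_false]
        rw [pvBackA_eq tol seq1 seq2 (i + 1) j hi (le_of_lt hj') acc]
        rw [ht1]
termination_by i j => i + j

theorem pvAltG (seq1 seq2 : List String) (tol : Int) :
    lcs_1gram_alt seq1 seq2 tol = pvG tol seq1.reverse seq2.reverse := by
  show (((pvBuildB tol seq2 (List.replicate (seq2.length + 1) (0, [])) seq1).getD seq2.length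
      (0, [])).1,
    ((pvBuildB tol seq2 (List.replicate (seq2.length + 1) (0, [])) seq1).getD seq2.length
      (0, [])).2) = _
  rw [show (List.replicate (seq2.length + 1) ((0 : Int), ([] : List String)))
      = pvRowG tol [] [] seq2 from (pvRowG_nil tol [] seq2).symm]
  rw [pvBuildB_rowG tol seq2 seq1 [], pvRowG_getD_last tol _ seq2 []]
  simp

theorem pvAG (seq1 seq2 : List String) (tol : Int) :
    lcs_1gram seq1 seq2 tol = pvG tol seq1.reverse seq2.reverse := by
  show (((pvBuildA tol seq2 (List.replicate (seq2.length + 1) 0) seq1).getD seq1.length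
      []).getD seq2.length 0,
    (pvBackA tol seq1 seq2 (pvBuildA tol seq2 (List.replicate (seq2.length + 1) 0) seq1)
      seq1.length seq2.length []).reverse) = _
  rw [pvReplicate_row tol seq2, pvTableA tol seq2 seq1 [] seq1.length le_rfl,
    pvRowG_fst_getD tol _ seq2 seq2.length [] le_rfl,
    ← pvReplicate_row tol seq2,
    pvBackA_eq tol seq1 seq2 seq1.length seq2.length le_rfl le_rfl []]
  simp

-- ===== VERDICT (by name: the statement is the Claim_ definition above) =====
theorem lcs_1gram_spec : Claim_equal_lcs_1gram := by
  intro seq1 seq2 tolerance _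
  show lcs_1gram seq1 seq2 tolerance = lcs_1gram_alt seq1 seq2 tolerance
  rw [pvAG, pvAltG]
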